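-- pv_equiv track=rewrite | github.com/LasseKohlmeyer/ma-doc-embeddings | corpus_structure.py | without_gerneral_words
-- ===== SOURCE A (Python) =====
-- from typing import Union, List, Dict, Tuple, Set, Generator, Any
--
-- def without_gerneral_words(common_words: Dict[str, Set[str]]) -> Dict[str, Set[str]]:
--     medium_common_words = {}
--     for series_id_a, series_words_a in common_words.items():
--         series_words_a_copy = set()
--         series_words_a_copy.update(series_words_a)
--         general_words = set()
--         for series_id_b, series_words_b in common_words.items():
--             if series_id_a != series_id_b:
--                 general_words.update(series_words_a_copy.intersection(series_words_b))
--
--         series_words_a_copy.difference_update(general_words)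
--         medium_common_words[series_id_a] = series_words_a_copy
--     return medium_common_words
-- ===== SOURCE B (Python) =====
-- def without_gerneral_words(common_words):
--     freq = {}
--     for series_words in common_words.values():
--         for w in series_words:
--             freq[w] = freq.get(w, 0) + 1
--     return {series_id: {w for w in series_words if freq[w] == 1}
--             for series_id, series_words in common_words.items()}
-- ===== Notes on version B (the rewrite author's own statement) =====
-- stated objective: faster
-- what changed: Replaces A's nested pass (for every series, intersect its word set with every other series' set) by a single global word-frequency table built in one pass, then one filter pass keeping each series' words whose global count is 1.
import Mathlib
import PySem

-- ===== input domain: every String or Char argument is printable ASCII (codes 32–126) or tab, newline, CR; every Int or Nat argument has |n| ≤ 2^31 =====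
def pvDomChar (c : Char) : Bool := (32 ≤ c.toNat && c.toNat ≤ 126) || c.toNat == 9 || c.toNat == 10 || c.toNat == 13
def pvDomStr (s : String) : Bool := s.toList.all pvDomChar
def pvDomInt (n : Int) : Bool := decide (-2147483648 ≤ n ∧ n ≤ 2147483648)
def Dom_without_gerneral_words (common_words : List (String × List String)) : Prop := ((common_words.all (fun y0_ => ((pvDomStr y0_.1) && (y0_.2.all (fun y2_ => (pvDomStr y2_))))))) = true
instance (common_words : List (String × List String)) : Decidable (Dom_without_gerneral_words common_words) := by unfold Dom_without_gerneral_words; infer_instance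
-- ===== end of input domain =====

-- B replaces A's quadratic all-pairs intersection pass by one global word-frequency table
-- followed by a single filter pass (objective: faster, O(total words) vs O(n * total words)).

-- ===== PORT A =====
def without_gerneral_words (common_words : List (String × List String)) : List (String × List String) :=
  (common_words.foldl (fun medium pa =>
      let copy := PySem.Set.update PySem.Set.empty pa.2
      let general := common_words.foldl (fun g pb =>
          if pa.1 ≠ pb.1 then PySem.Set.update g (PySem.Set.inter copy pb.2) else g)
        PySem.Set.empty
      medium.insert pa.1 (PySem.Set.diff copy general))
    PySem.Dict.empty).items

-- ===== PORT B =====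
def without_gerneral_words_alt (common_words : List (String × List String)) : List (String × List String) :=
  let freq := common_words.foldl (fun d p =>
      p.2.foldl (fun d w => d.insert w (d.getD w 0 + 1)) d) (PySem.Dict.empty : PySem.Dict String Int)
  (common_words.foldl (fun out p =>
      out.insert p.1 (PySem.Set.ofList (p.2.filter (fun w => freq.getD w 0 == 1))))
    PySem.Dict.empty).items

-- ===== PRECONDITION & SPEC =====
-- Pre_ excludes association lists with a repeated key or a repeated word inside a value: those
-- do not represent the Python argument (a dict[str, set[str]], whose keys and whose members of
-- each value set are necessarily distinct), so A is never called on them.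
def Pre_without_gerneral_words (common_words : List (String × List String)) : Prop :=
  (common_words.map Prod.fst).Nodup ∧ ∀ p ∈ common_words, p.2.Nodup
instance (common_words : List (String × List String)) : Decidable (Pre_without_gerneral_words common_words) := by unfold Pre_without_gerneral_words; infer_instance
def pvWitness_without_gerneral_words : (List (String × List String)) :=
  [("a", ["x", "y"]), ("b", ["y", "z"]), ("c", ["q"])]

def Spec_without_gerneral_words (common_words : List (String × List String)) (out : List (String × List String)) : Prop := out = without_gerneral_words_alt common_words
instance (common_words : List (String × List String)) (out : List (String × List String)) : Decidable (Spec_without_gerneral_words common_words out) := by unfold Spec_without_gerneral_words; infer_instance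

-- ===== CLAIM (what is proved, stated in full; the proofs are below) =====
def Claim_equal_without_gerneral_words : Prop := ∀ (common_words : List (String × List String)), Dom_without_gerneral_words common_words → Pre_without_gerneral_words common_words → Spec_without_gerneral_words common_words (without_gerneral_words common_words)

-- ===== LEMMAS AND PROOFS =====

-- freq's inner loop adds ws.count w to the stored count of w
lemma freq_inner (ws : List String) (d : PySem.Dict String Int) (w : String) :
    (ws.foldl (fun d w' => d.insert w' (d.getD w' 0 + 1)) d).getD w 0
      = d.getD w 0 + (ws.count w : Int) := by
  induction ws generalizing d with
  | nil => simp
  | cons x t ih =>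
      simp only [List.foldl_cons, ih, PySem.Dict.getD_insert, List.count_cons]
      by_cases h : w = x
      · simp [h]; ring
      · simp [h]; exact fun hh => h hh.symm

-- freq counts occurrences of w over all value lists
lemma freq_getD (l : List (String × List String)) (d : PySem.Dict String Int) (w : String) :
    (l.foldl (fun d p => p.2.foldl (fun d w' => d.insert w' (d.getD w' 0 + 1)) d) d).getD w 0
      = d.getD w 0 + ((l.flatMap (fun p => p.2)).count w : Int) := by
  induction l generalizing d with
  | nil => simp
  | cons p t ih =>
      simp only [List.foldl_cons, ih, freq_inner, List.flatMap_cons, List.count_append]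
      push_cast; ring

-- membership in A's general_words accumulator
lemma mem_general (l : List (String × List String)) (ka : String) (copy : PySem.Set String)
    (g : PySem.Set String) (w : String) :
    w ∈ l.foldl (fun g pb => if ka ≠ pb.1 then PySem.Set.update g (PySem.Set.inter copy pb.2) else g) g
      ↔ w ∈ g ∨ ∃ pb ∈ l, ka ≠ pb.1 ∧ w ∈ copy ∧ w ∈ pb.2 := by
  induction l generalizing g with
  | nil => simp
  | cons p t ih =>
      simp only [List.foldl_cons, List.mem_cons]
      by_cases h : ka ≠ p.1
      · simp only [if_pos h, ih, PySem.Set.mem_update, PySem.Set.mem_inter]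
        constructor
        · rintro ((hg | ⟨hc, hb⟩) | ⟨pb, hm, hne, hc, hb⟩)
          · exact Or.inl hg
          · exact Or.inr ⟨p, Or.inl rfl, h, hc, hb⟩
          · exact Or.inr ⟨pb, Or.inr hm, hne, hc, hb⟩
        · rintro (hg | ⟨pb, (rfl | hm), hne, hc, hb⟩)
          · exact Or.inl (Or.inl hg)
          · exact Or.inl (Or.inr ⟨hc, hb⟩)
          · exact Or.inr ⟨pb, hm, hne, hc, hb⟩
      · simp only [if_neg h, ih]
        push Not at h
        constructor
        · rintro (hg | ⟨pb, hm, hne, hc, hb⟩)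
          · exact Or.inl hg
          · exact Or.inr ⟨pb, Or.inr hm, hne, hc, hb⟩
        · rintro (hg | ⟨pb, (rfl | hm), hne, hc, hb⟩)
          · exact Or.inl hg
          · exact absurd h hne
          · exact Or.inr ⟨pb, hm, hne, hc, hb⟩

-- "w occurs exactly once overall" ↔ "no series with another key contains w",
-- given that w is in the (nodup) word list of the entry with key ka
lemma count_one_iff (l : List (String × List String)) (ka : String) (wa : List String) (w : String)
    (hk : (l.map Prod.fst).Nodup) (hv : ∀ p ∈ l, p.2.Nodup)
    (hmem : (ka, wa) ∈ l) (hw : w ∈ wa) :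
    ((l.flatMap (fun p => p.2)).count w = 1) ↔ ∀ pb ∈ l, pb.1 ≠ ka → w ∉ pb.2 := by
  induction l with
  | nil => cases hmem
  | cons p t ih =>
      simp only [List.map_cons, List.nodup_cons] at hk
      obtain ⟨hk1, hk2⟩ := hk
      simp only [List.flatMap_cons, List.count_append]
      rcases List.mem_cons.mp hmem with heq | hmt
      · -- the head is (ka, wa)
        subst heq
        have hc1 : List.count w wa = 1 :=
          List.count_eq_one_of_mem (hv _ (List.mem_cons_self)) hw
        have hkeys : ∀ pb ∈ t, pb.1 ≠ ka := by
          intro pb hpb h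
          have hm : pb.1 ∈ List.map Prod.fst t := List.mem_map_of_mem (f := Prod.fst) hpb
          rw [h] at hm
          exact hk1 hm
        constructor
        · intro h pb hpb hne hwb
          rcases List.mem_cons.mp hpb with rfl | hpb
          · exact hne rfl
          · have : 1 ≤ List.count w (t.flatMap (fun p => p.2)) :=
              List.one_le_count_iff.mpr (List.mem_flatMap.mpr ⟨pb, hpb, hwb⟩)
            simp only [hc1] at h; omega
        · intro h
          have : List.count w (t.flatMap (fun p => p.2)) = 0 := by
            rw [List.count_eq_zero]
            intro hmemf
            rcases List.mem_flatMap.mp hmemf with ⟨pb, hpb, hwb⟩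
            exact h pb (List.mem_cons_of_mem _ hpb) (hkeys pb hpb) hwb
          simp [hc1, this]
      · -- (ka, wa) is in the tail
        have hpka : p.1 ≠ ka := by
          intro h
          have hm : (ka, wa).1 ∈ List.map Prod.fst t := List.mem_map_of_mem (f := Prod.fst) hmt
          rw [← h] at hm
          exact hk1 hm
        have hwt : 1 ≤ List.count w (t.flatMap (fun p => p.2)) :=
          List.one_le_count_iff.mpr (List.mem_flatMap.mpr ⟨(ka, wa), hmt, hw⟩)
        have hcp : List.count w p.2 ≤ 1 := (List.nodup_iff_count_le_one.mp (hv _ List.mem_cons_self)) w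
        have iht := ih hk2 (fun q hq => hv q (List.mem_cons_of_mem _ hq)) hmt
        constructor
        · intro h pb hpb hne hwb
          rcases List.mem_cons.mp hpb with rfl | hpb
          · have : 1 ≤ List.count w pb.2 := List.one_le_count_iff.mpr hwb
            omega
          · have hcp0 : List.count w p.2 = 0 := by omega
            have ht1 : List.count w (t.flatMap (fun p => p.2)) = 1 := by omega
            exact iht.mp ht1 pb hpb hne hwb
        · intro h
          have hp0 : List.count w p.2 = 0 := by
            rw [List.count_eq_zero]
            exact h p List.mem_cons_self hpka
          have ht1 : List.count w (t.flatMap (fun p => p.2)) = 1 :=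
            iht.mpr (fun pb hpb hne => h pb (List.mem_cons_of_mem _ hpb) hne)
          omega

theorem without_gerneral_words_spec : Claim_equal_without_gerneral_words := by
  intro l _hdom hpre
  obtain ⟨hk, hv⟩ := hpre
  unfold Spec_without_gerneral_words without_gerneral_words without_gerneral_words_alt
  congr 1
  apply PySem.List.foldl_congr_mem'
  intro p hp acc
  dsimp only
  congr 1
  -- per-entry: A's set difference equals B's count-based filter
  have hnd : p.2.Nodup := hv p hp
  have hcopy : PySem.Set.update PySem.Set.empty p.2 = p.2 := by
    rw [show (PySem.Set.empty : PySem.Set String) = [] from rfl, PySem.Set.update_nil_left,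
      PySem.Set.ofList_eq_self_of_nodup _ hnd]
  rw [PySem.Set.ofList_eq_self_of_nodup _ (List.Nodup.filter _ hnd)]
  show PySem.Set.diff _ _ = _
  rw [hcopy]
  have hdiff : ∀ (s t : PySem.Set String),
      PySem.Set.diff s t = s.filter (fun x => !(PySem.Set.contains t x)) := fun _ _ => rfl
  rw [hdiff]
  apply List.filter_congr
  intro w hw
  -- both sides are Bools; compare via the two characterizations
  have hfreq := freq_getD l PySem.Dict.empty w
  simp only [PySem.Dict.getD_empty] at hfreq
  have hcnt := count_one_iff l p.1 p.2 w hk hv hp hw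
  have hgen : w ∈ (l.foldl (fun g pb => if p.1 ≠ pb.1 then PySem.Set.update g (PySem.Set.inter p.2 pb.2) else g) PySem.Set.empty)
      ↔ ∃ pb ∈ l, p.1 ≠ pb.1 ∧ w ∈ p.2 ∧ w ∈ pb.2 := by
    rw [mem_general]
    simp
  simp only [ne_eq, ite_not, show (PySem.Set.empty : PySem.Set String) = [] from rfl] at hgen
  by_cases hone : (l.flatMap (fun p => p.2)).count w = 1
  · have hno : ¬ (w ∈ List.foldl (fun g pb => if p.1 = pb.1 then g else PySem.Set.update g (PySem.Set.inter p.2 pb.2)) [] l) := by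
      intro hb
      rcases hgen.mp hb with ⟨pb, hpb, hne, _, hwb⟩
      exact hcnt.mp hone pb hpb (Ne.symm hne) hwb
    simp [hfreq, hone, hno]
  · have hyes : w ∈ List.foldl (fun g pb => if p.1 = pb.1 then g else PySem.Set.update g (PySem.Set.inter p.2 pb.2)) [] l := by
      apply hgen.mpr
      by_contra hno
      push Not at hno
      refine hone (hcnt.mpr ?_)
      intro pb hpb hne hwb
      exact (hno pb hpb (Ne.symm hne) hw) hwb
    have h2 : ((l.flatMap (fun p => p.2)).count w : Int) ≠ 1 := by exact_mod_cast hone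
    simp [hfreq, hyes, h2]
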